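-- pv_equiv track=rewrite | github.com/dzhao14/HackerRank_code | sorting/median.py | median_counting
-- ===== SOURCE A (Python) =====
-- def median_counting(arr, rank, upper):
--     counts = [0 for i in range(upper)]
--     sums = [0 for i in range(upper)]
--     for i in range(len(arr)):
--         counts[arr[i]] += 1
--     tot = 0
--     for i in range(upper):
--         tot += counts[i]
--         sums[i] = tot
--     output = [0 for i in range(len(arr))]
--     for i in arr:
--         if sums[i] -1 == rank:
--             return i
--         else:
--             output[sums[i] - 1] = i
--             sums[i] -= 1
-- ===== SOURCE B (Python) =====
-- def median_counting(arr, rank, upper):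
--     if not (0 <= rank < len(arr)):
--         return None
--     counts = {}
--     for x in arr:
--         counts[x] = counts.get(x, 0) + 1
--     cum = 0
--     for v in range(upper):
--         cum += counts.get(v, 0)
--         if cum > rank:
--             return v
--     return None
-- ===== Notes on version B (the rewrite author's own statement) =====
-- stated objective: simpler
-- what changed: The counting-sort placement loop over the array (with its mutable sums/output arrays and per-element decrements) is replaced by a plain prefix scan over the value range 0..upper-1 that returns the first value whose cumulative count exceeds rank; counts are kept in a dict built in one pass.
-- outside the precondition, e.g. on median_counting([5, -1], 0, 6): A returns -1, B returns 5
import Mathlib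
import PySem

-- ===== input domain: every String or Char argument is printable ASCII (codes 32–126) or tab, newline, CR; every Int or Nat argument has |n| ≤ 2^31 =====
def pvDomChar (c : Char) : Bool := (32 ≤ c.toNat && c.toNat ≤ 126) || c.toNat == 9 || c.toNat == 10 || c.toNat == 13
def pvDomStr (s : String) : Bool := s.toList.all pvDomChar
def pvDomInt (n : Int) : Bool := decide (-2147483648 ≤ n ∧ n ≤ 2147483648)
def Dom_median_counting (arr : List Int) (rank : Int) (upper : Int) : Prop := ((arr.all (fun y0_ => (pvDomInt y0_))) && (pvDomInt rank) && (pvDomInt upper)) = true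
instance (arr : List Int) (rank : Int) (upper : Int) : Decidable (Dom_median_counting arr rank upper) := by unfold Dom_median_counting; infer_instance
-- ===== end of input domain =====

-- B replaces A's counting-sort placement loop (mutable sums/output arrays, per-element decrements)
-- by a single prefix scan over the value range returning the first value whose cumulative count
-- exceeds rank; equivalence is proved on arrays whose values lie in [0, upper).

-- ===== PORT A =====
-- raises (IndexError, outside Pre_) are conflated with Python's None return: both are `none`.

-- for i in range(len(arr)): counts[arr[i]] += 1
def pvBuildCounts : List Int → List Int → Option (List Int)
  | [], cs => some cs
  | x :: rest, cs =>
    match PySem.List.pyGet? cs x with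
    | none => none
    | some c => pvBuildCounts rest (PySem.List.pySetD cs x (c + 1))

-- for i in arr: if sums[i]-1 == rank: return i else: output[sums[i]-1] = i; sums[i] -= 1
def pvLoopA (rank : Int) : List Int → List Int → List Int → Option Int
  | [], _, _ => none
  | x :: rest, sums, output =>
    match PySem.List.pyGet? sums x with
    | none => none
    | some sx =>
      if sx - 1 = rank then some x
      else
        match PySem.List.pySet? output (sx - 1) x with
        | none => none
        | some output' => pvLoopA rank rest (PySem.List.pySetD sums x (sx - 1)) output'

def median_counting (arr : List Int) (rank : Int) (upper : Int) : Option Int :=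
  let counts0 := (PySem.List.pyRange 0 upper 1).map (fun _ => (0 : Int))
  match pvBuildCounts arr counts0 with
  | none => none
  | some counts =>
    let sums0 := (PySem.List.pyRange 0 upper 1).map (fun _ => (0 : Int))
    -- tot = 0; for i in range(upper): tot += counts[i]; sums[i] = tot   (indices provably in range)
    let ts := (PySem.List.pyRange 0 upper 1).foldl
      (fun (p : Int × List Int) i =>
        let tot := p.1 + PySem.List.pyGetD counts i 0
        (tot, PySem.List.pySetD p.2 i tot)) ((0 : Int), sums0)
    let output := arr.map (fun _ => (0 : Int))
    pvLoopA rank arr ts.2 output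

-- ===== PORT B =====

-- cum = 0; for v in range(upper): cum += counts.get(v, 0); if cum > rank: return v
def pvScanB (rank : Int) (counts : PySem.Dict Int Int) : List Int → Int → Option Int
  | [], _ => none
  | v :: vs, cum =>
    let c := cum + counts.getD v 0
    if c > rank then some v else pvScanB rank counts vs c

def median_counting_alt (arr : List Int) (rank : Int) (upper : Int) : Option Int :=
  if 0 ≤ rank ∧ rank < (arr.length : Int) then
    let counts := arr.foldl (fun d x => d.insert x (d.getD x 0 + 1)) PySem.Dict.empty
    pvScanB rank counts (PySem.List.pyRange 0 upper 1) 0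
  else none

-- ===== PRECONDITION & SPEC =====
-- Pre_ excludes inputs where A raises IndexError (some value outside [-upper, upper)) and, only when
-- a selection actually happens (0 ≤ rank < len(arr)), arrays containing negative values: counting
-- sort's natural domain is values in [0, upper), and on negative values A picks its answer through
-- Python's negative-index wraparound, an accident of the implementation.
def Pre_median_counting (arr : List Int) (rank : Int) (upper : Int) : Prop :=
  (∀ x ∈ arr, -upper ≤ x ∧ x < upper) ∧
  (0 ≤ rank → rank < (arr.length : Int) → ∀ x ∈ arr, 0 ≤ x)
instance (arr : List Int) (rank : Int) (upper : Int) : Decidable (Pre_median_counting arr rank upper) := by unfold Pre_median_counting; infer_instance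

def pvWitness_median_counting : List Int × Int × Int := ([1, 0, 2, 1], 2, 3)

def Spec_median_counting (arr : List Int) (rank : Int) (upper : Int) (out : Option Int) : Prop := out = median_counting_alt arr rank upper
instance (arr : List Int) (rank : Int) (upper : Int) (out : Option Int) : Decidable (Spec_median_counting arr rank upper out) := by unfold Spec_median_counting; infer_instance

-- ===== CLAIM (what is proved, stated in full; the proofs are below) =====
def Claim_equal_median_counting : Prop := ∀ (arr : List Int) (rank : Int) (upper : Int), Dom_median_counting arr rank upper → Pre_median_counting arr rank upper → Spec_median_counting arr rank upper (median_counting arr rank upper)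

-- ===== LEMMAS AND PROOFS =====

-- prefix-count function: PS arr j = #{occurrences of values in [0, j]} (as the counting sort sees it)
def pvPS (arr : List Int) (j : Int) : Int :=
  ((PySem.List.pyRange 0 (j + 1) 1).map (fun i => (arr.count i : Int))).sum


theorem pvPS_neg (arr : List Int) (j : Int) (h : j < 0) : pvPS arr j = 0 := by
  unfold pvPS
  rw [PySem.List.pyRange_one_eq_nil (by omega)]
  simp

theorem pvPS_succ (arr : List Int) (j : Int) (h : 0 ≤ j) :
    pvPS arr j = pvPS arr (j - 1) + (arr.count j : Int) := by
  unfold pvPS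
  have h1 : j - 1 + 1 = j := by omega
  rw [h1, PySem.List.pyRange_one_succ_right h, List.map_append, List.sum_append]
  simp

theorem pvPS_nonneg (arr : List Int) (j : Int) : 0 ≤ pvPS arr j := by
  unfold pvPS
  apply List.sum_nonneg
  intro x hx
  simp only [List.mem_map] at hx
  obtain ⟨i, _, rfl⟩ := hx
  positivity

theorem pvPS_mono (arr : List Int) (j k : Int) (h : j ≤ k) : pvPS arr j ≤ pvPS arr k := by
  by_cases hj : j < 0
  · rw [pvPS_neg arr j hj]; exact pvPS_nonneg arr k
  · unfold pvPS
    rw [PySem.List.pyRange_one_append 0 (j + 1) (k + 1) (by omega) (by omega)]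
    rw [List.map_append, List.sum_append]
    have : 0 ≤ ((PySem.List.pyRange (j + 1) (k + 1) 1).map (fun i => (arr.count i : Int))).sum := by
      apply List.sum_nonneg
      intro x hx
      simp only [List.mem_map] at hx
      obtain ⟨i, _, rfl⟩ := hx
      positivity
    omega

theorem pv_sum_count_nodup (r : List Int) (hr : r.Nodup) :
    ∀ l : List Int, (∀ x ∈ l, x ∈ r) → (r.map (fun i => (l.count i : Int))).sum = (l.length : Int) := by
  intro l
  induction l with
  | nil => intro _; simp
  | cons h t ih =>
    intro hmem
    have e1 : r.map (fun i => (((h :: t).count i : Nat) : Int))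
        = r.map (fun i => ((t.count i : Int)) + (if (i == h) = true then (1 : Int) else 0)) := by
      apply List.map_congr_left
      intro i _
      by_cases hi : i = h <;> simp [hi, Ne.symm]
    rw [e1, PySem.List.sum_map_add_int, ih (fun x hx => hmem x (List.mem_cons_of_mem _ hx)),
        PySem.List.sum_map_ite_one_zero]
    have hc : r.countP (fun i => i == h) = 1 := by
      rw [← List.count]
      exact List.count_eq_one_of_mem hr (hmem h List.mem_cons_self)
    rw [hc]
    simp

theorem pvPS_total (arr : List Int) (upper : Int)
    (h : ∀ x ∈ arr, 0 ≤ x ∧ x < upper) :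
    pvPS arr (upper - 1) = (arr.length : Int) := by
  unfold pvPS
  have h1 : upper - 1 + 1 = upper := by omega
  rw [h1]
  exact pv_sum_count_nodup _ (PySem.List.nodup_pyRange_one 0 upper) arr
    (fun x hx => (PySem.List.mem_pyRange_one).2 (by have := h x hx; omega))


-- counts build: each in-range slot ends at its count
theorem pvBuildCounts_spec :
    ∀ (l cs : List Int), (∀ x ∈ l, 0 ≤ x ∧ x < (cs.length : Int)) →
    ∃ cs', pvBuildCounts l cs = some cs' ∧ cs'.length = cs.length ∧
      ∀ j : Int, 0 ≤ j → j < (cs.length : Int) →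
        PySem.List.pyGetD cs' j 0 = PySem.List.pyGetD cs j 0 + (l.count j : Int) := by
  intro l
  induction l with
  | nil =>
    intro cs _
    exact ⟨cs, rfl, rfl, by intro j _ _; simp [List.count_nil]⟩
  | cons x rest ih =>
    intro cs hmem
    obtain ⟨hx0, hx1⟩ := hmem x List.mem_cons_self
    have hget : PySem.List.pyGet? cs x = some cs[x.toNat] :=
      PySem.List.pyGet?_eq_some_getElem cs hx0 hx1
    have hset : PySem.List.pySetD cs x (cs[x.toNat] + 1) = cs.set x.toNat (cs[x.toNat] + 1) :=
      PySem.List.pySetD_of_nonneg cs _ hx0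
    have hlen2 : (cs.set x.toNat (cs[x.toNat] + 1)).length = cs.length := by simp
    obtain ⟨cs', h1, h2, h3⟩ := ih (cs.set x.toNat (cs[x.toNat] + 1))
      (by intro y hy; have := hmem y (List.mem_cons_of_mem _ hy); simpa using this)
    refine ⟨cs', ?_, by omega, ?_⟩
    · show pvBuildCounts (x :: rest) cs = some cs'
      unfold pvBuildCounts
      rw [hget]
      simpa [hset] using h1
    · intro j hj0 hj1
      have hx' : x.toNat < cs.length := by omega
      have hj' : j.toNat < cs.length := by omega
      rw [h3 j hj0 (by omega)]
      rw [PySem.List.pyGetD_eq_getElem _ _ hj0 (by omega),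
          PySem.List.pyGetD_eq_getElem _ _ hj0 (by omega)]
      rw [List.getElem_set]
      have hcnt : ((x :: rest).count j : Int) = (rest.count j : Int) + (if j = x then 1 else 0) := by
        by_cases hxy : j = x
        · simp [hxy]
        · simp [hxy, Ne.symm hxy]
      rw [hcnt]
      by_cases hne : x.toNat = j.toNat
      · have hjx : j = x := by omega
        subst hjx
        rw [if_pos hne, if_pos rfl]
        ring
      · have hjx : ¬ j = x := by omega
        rw [if_neg hne, if_neg hjx]
        ring

-- prefix-sum loop: final sums[j] = tot + sum of counts over [a, j]
theorem pvSumsFold_spec (counts : List Int) (upper : Int) :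
    ∀ (a : Int) (tot : Int) (s : List Int), 0 ≤ a → (s.length : Int) = upper →
    (((PySem.List.pyRange a upper 1).foldl
        (fun (p : Int × List Int) i =>
          let tot := p.1 + PySem.List.pyGetD counts i 0
          (tot, PySem.List.pySetD p.2 i tot)) (tot, s)).2.length = s.length)
    ∧ ∀ j : Int, 0 ≤ j → j < upper →
        PySem.List.pyGetD (((PySem.List.pyRange a upper 1).foldl
          (fun (p : Int × List Int) i =>
            let tot := p.1 + PySem.List.pyGetD counts i 0
            (tot, PySem.List.pySetD p.2 i tot)) (tot, s)).2) j 0 =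
        if j < a then PySem.List.pyGetD s j 0
        else tot + ((PySem.List.pyRange a (j + 1) 1).map (fun i => PySem.List.pyGetD counts i 0)).sum := by
  suffices H : ∀ (k : Nat) (a tot : Int) (s : List Int), (upper - a).toNat = k → 0 ≤ a → (s.length : Int) = upper →
      (((PySem.List.pyRange a upper 1).foldl
          (fun (p : Int × List Int) i =>
            let tot := p.1 + PySem.List.pyGetD counts i 0
            (tot, PySem.List.pySetD p.2 i tot)) (tot, s)).2.length = s.length)
      ∧ ∀ j : Int, 0 ≤ j → j < upper →
          PySem.List.pyGetD (((PySem.List.pyRange a upper 1).foldl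
            (fun (p : Int × List Int) i =>
              let tot := p.1 + PySem.List.pyGetD counts i 0
              (tot, PySem.List.pySetD p.2 i tot)) (tot, s)).2) j 0 =
          if j < a then PySem.List.pyGetD s j 0
          else tot + ((PySem.List.pyRange a (j + 1) 1).map (fun i => PySem.List.pyGetD counts i 0)).sum by
    exact fun a tot s ha hl => H _ a tot s rfl ha hl
  intro k
  induction k with
  | zero =>
    intro a tot s hk ha hl
    have hua : upper ≤ a := by omega
    rw [PySem.List.pyRange_one_eq_nil hua]
    refine ⟨rfl, ?_⟩
    intro j hj0 hj1
    rw [if_pos (by omega)]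
    rfl
  | succ k ih =>
    intro a tot s hk ha hl
    have hau : a < upper := by omega
    have hlen : a.toNat < s.length := by omega
    have hset : PySem.List.pySetD s a (tot + PySem.List.pyGetD counts a 0)
        = s.set a.toNat (tot + PySem.List.pyGetD counts a 0) :=
      PySem.List.pySetD_of_nonneg s _ ha
    rw [PySem.List.pyRange_one_cons hau]
    simp only [List.foldl_cons]
    obtain ⟨ihlen, ihget⟩ := ih (a + 1) (tot + PySem.List.pyGetD counts a 0)
      (PySem.List.pySetD s a (tot + PySem.List.pyGetD counts a 0))
      (by omega) (by omega) (by rw [hset]; simp [hl])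
    have hslen : (PySem.List.pySetD s a (tot + PySem.List.pyGetD counts a 0)).length = s.length := by
      rw [hset]; simp
    constructor
    · rw [ihlen, hslen]
    · intro j hj0 hj1
      rw [ihget j hj0 hj1]
      rcases lt_trichotomy j a with hja | hja | hja
      · rw [if_pos (by omega), if_pos hja]
        rw [hset, PySem.List.pyGetD_eq_getElem _ _ hj0 (by simp; omega),
            PySem.List.pyGetD_eq_getElem _ _ hj0 (by omega)]
        rw [List.getElem_set]
        rw [if_neg (by omega)]
      · subst hja
        rw [if_pos (by omega), if_neg (by omega)]
        rw [hset, PySem.List.pyGetD_eq_getElem _ _ hj0 (by simp; omega)]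
        rw [List.getElem_set, if_pos rfl]
        rw [PySem.List.pyRange_one_singleton]
        simp
      · rw [if_neg (by omega), if_neg (by omega)]
        rw [PySem.List.pyRange_one_append a (a + 1) (j + 1) (by omega) (by omega)]
        rw [List.map_append, List.sum_append, PySem.List.pyRange_one_singleton]
        simp
        ring


-- invariant of A's placement loop: values index into sums, per-value intervals
-- [sums[x]-count(x), sums[x]-1] lie in [0, n) and are pairwise disjoint
def pvInv (n : Int) (rest s : List Int) : Prop :=
  (∀ x ∈ rest, 0 ≤ x ∧ x < (s.length : Int)) ∧
  (∀ x ∈ rest, (rest.count x : Int) ≤ PySem.List.pyGetD s x 0 ∧ PySem.List.pyGetD s x 0 ≤ n) ∧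
  (∀ x ∈ rest, ∀ y ∈ rest, x ≠ y →
    PySem.List.pyGetD s x 0 ≤ PySem.List.pyGetD s y 0 - (rest.count y : Int) ∨
    PySem.List.pyGetD s y 0 ≤ PySem.List.pyGetD s x 0 - (rest.count x : Int))

theorem pvGetD_set (s : List Int) (h x w : Int) (hh0 : 0 ≤ h) (hx0 : 0 ≤ x)
    (hxl : x < (s.length : Int)) :
    PySem.List.pyGetD (PySem.List.pySetD s h w) x 0 = if x = h then w else PySem.List.pyGetD s x 0 := by
  rw [PySem.List.pySetD_of_nonneg s _ hh0]
  rw [PySem.List.pyGetD_eq_getElem _ _ hx0 (by simp; omega), List.getElem_set]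
  by_cases hxh : x = h
  · rw [if_pos (by omega), if_pos hxh]
  · rw [if_neg (by omega), if_neg hxh, PySem.List.pyGetD_eq_getElem _ _ hx0 (by omega)]

theorem pvCount_cons (h x : Int) (t : List Int) :
    (((h :: t).count x : Nat) : Int) = ((t.count x : Nat) : Int) + (if x = h then 1 else 0) := by
  by_cases hxh : x = h
  · simp [hxh]
  · simp [hxh, Ne.symm hxh]

theorem pvInv_step (n : Int) (h : Int) (t s : List Int) (hinv : pvInv n (h :: t) s) :
    pvInv n t (PySem.List.pySetD s h (PySem.List.pyGetD s h 0 - 1)) := by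
  obtain ⟨hb, hr, hd⟩ := hinv
  obtain ⟨hh0, hhl⟩ := hb h List.mem_cons_self
  have hlen : (PySem.List.pySetD s h (PySem.List.pyGetD s h 0 - 1)).length = s.length := by
    rw [PySem.List.pySetD_of_nonneg s _ hh0]; simp
  have hch : 0 < (h :: t).count h := List.count_pos_iff.2 List.mem_cons_self
  refine ⟨?_, ?_, ?_⟩
  · intro x hx
    have := hb x (List.mem_cons_of_mem _ hx)
    rw [hlen]
    exact this
  · intro x hx
    obtain ⟨hx0, hxl⟩ := hb x (List.mem_cons_of_mem _ hx)
    rw [pvGetD_set s h x _ hh0 hx0 hxl]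
    obtain ⟨hc1, hc2⟩ := hr x (List.mem_cons_of_mem _ hx)
    have hcc := pvCount_cons h x t
    by_cases hxh : x = h
    · rw [if_pos hxh]
      rw [hxh] at hc1 hc2 hcc ⊢
      constructor <;> omega
    · rw [if_neg hxh]
      rw [if_neg hxh] at hcc
      constructor <;> omega
  · intro x hx y hy hxy
    obtain ⟨hx0, hxl⟩ := hb x (List.mem_cons_of_mem _ hx)
    obtain ⟨hy0, hyl⟩ := hb y (List.mem_cons_of_mem _ hy)
    rw [pvGetD_set s h x _ hh0 hx0 hxl, pvGetD_set s h y _ hh0 hy0 hyl]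
    have hdis := hd x (List.mem_cons_of_mem _ hx) y (List.mem_cons_of_mem _ hy) hxy
    have hccx := pvCount_cons h x t
    have hccy := pvCount_cons h y t
    by_cases hxh : x = h <;> by_cases hyh : y = h
    · exact absurd (hxh.trans hyh.symm) hxy
    · rw [if_pos hxh, if_neg hyh]
      rw [if_pos hxh] at hccx
      rw [if_neg hyh] at hccy
      subst hxh
      omega
    · rw [if_neg hxh, if_pos hyh]
      rw [if_neg hxh] at hccx
      rw [if_pos hyh] at hccy
      subst hyh
      omega
    · rw [if_neg hxh, if_neg hyh]
      rw [if_neg hxh] at hccx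
      rw [if_neg hyh] at hccy
      omega

theorem pvLoopA_cons (rank h sx : Int) (t s out : List Int)
    (hget : PySem.List.pyGet? s h = some sx) :
    pvLoopA rank (h :: t) s out =
      if sx - 1 = rank then some h
      else
        match PySem.List.pySet? out (sx - 1) h with
        | none => none
        | some output' => pvLoopA rank t (PySem.List.pySetD s h (sx - 1)) output' := by
  have e : pvLoopA rank (h :: t) s out =
      match PySem.List.pyGet? s h with
      | none => none
      | some sx =>
        if sx - 1 = rank then some h
        else
          match PySem.List.pySet? out (sx - 1) h with
          | none => none
          | some output' => pvLoopA rank t (PySem.List.pySetD s h (sx - 1)) output' := rfl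
  rw [e, hget]

theorem pvLoopA_some (rank : Int) :
    ∀ (rest s out : List Int), pvInv (out.length : Int) rest s →
    ∀ v ∈ rest, PySem.List.pyGetD s v 0 - (rest.count v : Int) ≤ rank →
      rank < PySem.List.pyGetD s v 0 →
    pvLoopA rank rest s out = some v := by
  intro rest
  induction rest with
  | nil => intro s out _ v hv; simp at hv
  | cons h t ih =>
    intro s out hinv v hv hlow hhigh
    obtain ⟨hb, hr, hd⟩ := hinv
    obtain ⟨hh0, hhl⟩ := hb h List.mem_cons_self
    have hgd : PySem.List.pyGetD s h 0 = s[h.toNat] :=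
      PySem.List.pyGetD_eq_getElem s 0 hh0 hhl
    have hget : PySem.List.pyGet? s h = some (PySem.List.pyGetD s h 0) := by
      rw [hgd]; exact PySem.List.pyGet?_eq_some_getElem s hh0 hhl
    have hch : 0 < (h :: t).count h := List.count_pos_iff.2 List.mem_cons_self
    obtain ⟨hch1, hch2⟩ := hr h List.mem_cons_self
    rw [pvLoopA_cons rank h _ t s out hget]
    by_cases htrig : PySem.List.pyGetD s h 0 - 1 = rank
    · rw [if_pos htrig]
      by_cases hveq : h = v
      · rw [hveq]
      · exfalso
        rcases hd h List.mem_cons_self v hv hveq with hcase | hcase <;> omega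
    · rw [if_neg htrig]
      have hpos : 0 ≤ PySem.List.pyGetD s h 0 - 1 ∧
          PySem.List.pyGetD s h 0 - 1 < (out.length : Int) := by omega
      have hcast : PySem.List.pyGetD s h 0 - 1 = (((PySem.List.pyGetD s h 0 - 1).toNat : Nat) : Int) := by
        omega
      have hset : PySem.List.pySet? out (PySem.List.pyGetD s h 0 - 1) h
          = some (out.set (PySem.List.pyGetD s h 0 - 1).toNat h) := by
        rw [hcast]
        exact PySem.List.pySet?_natCast out _ h (by omega)
      rw [hset]
      show pvLoopA rank t (PySem.List.pySetD s h (PySem.List.pyGetD s h 0 - 1))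
        (out.set (PySem.List.pyGetD s h 0 - 1).toNat h) = some v
      have hinv' := pvInv_step (out.length : Int) h t s ⟨hb, hr, hd⟩
      have holen : ((out.set (PySem.List.pyGetD s h 0 - 1).toNat h).length : Int) = (out.length : Int) := by
        simp
      have hvt : v ∈ t := by
        by_cases hveq : v = h
        · subst hveq
          have hcc := pvCount_cons v v t
          rw [if_pos rfl] at hcc
          have : 0 < t.count v := by omega
          exact List.count_pos_iff.1 this
        · cases List.mem_cons.1 hv with
          | inl hh => exact absurd hh hveq
          | inr hh => exact hh
      have hnew : ∀ x : Int, x ∈ t →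
          PySem.List.pyGetD (PySem.List.pySetD s h (PySem.List.pyGetD s h 0 - 1)) x 0
          = if x = h then PySem.List.pyGetD s h 0 - 1 else PySem.List.pyGetD s x 0 := by
        intro x hx
        obtain ⟨hx0, hxl⟩ := hb x (List.mem_cons_of_mem _ hx)
        exact pvGetD_set s h x _ hh0 hx0 hxl
      have happ := ih (PySem.List.pySetD s h (PySem.List.pyGetD s h 0 - 1))
        (out.set (PySem.List.pyGetD s h 0 - 1).toNat h)
        (by rw [← holen] at hinv'; exact hinv')
        v hvt
      rw [hnew v hvt] at happ
      have hcc := pvCount_cons h v t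
      by_cases hveq : v = h
      · rw [if_pos hveq] at happ hcc
        subst hveq
        exact happ (by omega) (by omega)
      · rw [if_neg hveq] at happ hcc
        exact happ (by omega) (by omega)

theorem pvLoopA_none (rank : Int) :
    ∀ (rest s out : List Int), pvInv (out.length : Int) rest s →
    (∀ x ∈ rest, ¬(PySem.List.pyGetD s x 0 - (rest.count x : Int) ≤ rank ∧
        rank < PySem.List.pyGetD s x 0)) →
    pvLoopA rank rest s out = none := by
  intro rest
  induction rest with
  | nil => intro s out _ _; rfl
  | cons h t ih =>
    intro s out hinv hno
    obtain ⟨hb, hr, hd⟩ := hinv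
    obtain ⟨hh0, hhl⟩ := hb h List.mem_cons_self
    have hgd : PySem.List.pyGetD s h 0 = s[h.toNat] :=
      PySem.List.pyGetD_eq_getElem s 0 hh0 hhl
    have hget : PySem.List.pyGet? s h = some (PySem.List.pyGetD s h 0) := by
      rw [hgd]; exact PySem.List.pyGet?_eq_some_getElem s hh0 hhl
    have hch : 0 < (h :: t).count h := List.count_pos_iff.2 List.mem_cons_self
    obtain ⟨hch1, hch2⟩ := hr h List.mem_cons_self
    have hnoh := hno h List.mem_cons_self
    rw [pvLoopA_cons rank h _ t s out hget]
    have htrig : ¬ (PySem.List.pyGetD s h 0 - 1 = rank) := by omega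
    rw [if_neg htrig]
    have hcast : PySem.List.pyGetD s h 0 - 1 = (((PySem.List.pyGetD s h 0 - 1).toNat : Nat) : Int) := by
      omega
    have hset : PySem.List.pySet? out (PySem.List.pyGetD s h 0 - 1) h
        = some (out.set (PySem.List.pyGetD s h 0 - 1).toNat h) := by
      rw [hcast]
      exact PySem.List.pySet?_natCast out _ h (by omega)
    rw [hset]
    show pvLoopA rank t (PySem.List.pySetD s h (PySem.List.pyGetD s h 0 - 1))
      (out.set (PySem.List.pyGetD s h 0 - 1).toNat h) = none
    have hinv' := pvInv_step (out.length : Int) h t s ⟨hb, hr, hd⟩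
    have holen : ((out.set (PySem.List.pyGetD s h 0 - 1).toNat h).length : Int) = (out.length : Int) := by
      simp
    apply ih _ _ (by rw [← holen] at hinv'; exact hinv')
    intro x hx
    obtain ⟨hx0, hxl⟩ := hb x (List.mem_cons_of_mem _ hx)
    rw [pvGetD_set s h x _ hh0 hx0 hxl]
    have hcc := pvCount_cons h x t
    have hnox := hno x (List.mem_cons_of_mem _ hx)
    by_cases hveq : x = h
    · rw [if_pos hveq] at hcc ⊢
      subst hveq
      omega
    · rw [if_neg hveq] at hcc ⊢
      omega

-- B's scan: finds the first v with pvPS arr v > rank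
theorem pvScanB_cons (rank a cum : Int) (vs : List Int) (counts : PySem.Dict Int Int) :
    pvScanB rank counts (a :: vs) cum =
      if cum + counts.getD a 0 > rank then some a
      else pvScanB rank counts vs (cum + counts.getD a 0) := rfl

theorem pvScanB_exists (arr : List Int) (rank upper : Int) (counts : PySem.Dict Int Int)
    (hc : ∀ v, counts.getD v 0 = (arr.count v : Int)) :
    ∀ a : Int, 0 ≤ a → a ≤ upper - 1 → pvPS arr (a - 1) ≤ rank → rank < pvPS arr (upper - 1) →
    ∃ v, a ≤ v ∧ v < upper ∧ pvPS arr (v - 1) ≤ rank ∧ rank < pvPS arr v ∧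
      pvScanB rank counts (PySem.List.pyRange a upper 1) (pvPS arr (a - 1)) = some v := by
  suffices H : ∀ (k : Nat) (a : Int), (upper - a).toNat = k → 0 ≤ a → a ≤ upper - 1 →
      pvPS arr (a - 1) ≤ rank → rank < pvPS arr (upper - 1) →
      ∃ v, a ≤ v ∧ v < upper ∧ pvPS arr (v - 1) ≤ rank ∧ rank < pvPS arr v ∧
        pvScanB rank counts (PySem.List.pyRange a upper 1) (pvPS arr (a - 1)) = some v by
    exact fun a => H _ a rfl
  intro k
  induction k with
  | zero => intro a hk ha hau _ _; omega
  | succ k ih =>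
    intro a hk ha hau hlow hhigh
    have hau' : a < upper := by omega
    rw [PySem.List.pyRange_one_cons hau', pvScanB_cons, hc a]
    have hPSa : pvPS arr a = pvPS arr (a - 1) + (arr.count a : Int) := pvPS_succ arr a ha
    by_cases h1 : rank < pvPS arr a
    · refine ⟨a, le_refl a, hau', hlow, h1, ?_⟩
      rw [if_pos (by omega)]
    · have hne : a ≠ upper - 1 := by
        intro heq
        rw [heq] at hPSa h1
        omega
      obtain ⟨v, hv1, hv2, hv3, hv4, hv5⟩ := ih (a + 1) (by omega) (by omega) (by omega)
        (by have : a + 1 - 1 = a := by ring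
            rw [this]; omega) hhigh
      refine ⟨v, by omega, hv2, hv3, hv4, ?_⟩
      rw [if_neg (by omega)]
      have e1 : a + 1 - 1 = a := by ring
      rw [e1] at hv5
      rw [← hPSa]
      exact hv5

-- negative-index wraparound: a value x in [-upper, 0) indexes like x + upper
def pvSlot (upper x : Int) : Int := if x < 0 then x + upper else x

theorem pvIdx_slot (n : Nat) (upper x : Int) (hn : (n : Int) = upper)
    (hx1 : -upper ≤ x) (hx2 : x < upper) :
    PySem.List.pyIdx? n x = PySem.List.pyIdx? n (pvSlot upper x) := by
  unfold pvSlot PySem.List.pyIdx?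
  split_ifs <;> try omega
  · rfl
  · congr 1
    omega

theorem pvSlot_range (upper x : Int) (hx1 : -upper ≤ x) (hx2 : x < upper) :
    0 ≤ pvSlot upper x ∧ pvSlot upper x < upper := by
  unfold pvSlot
  split_ifs <;> omega

theorem pvGet_slot (s : List Int) (upper x : Int) (hlen : (s.length : Int) = upper)
    (hx1 : -upper ≤ x) (hx2 : x < upper) :
    PySem.List.pyGet? s x = PySem.List.pyGet? s (pvSlot upper x) := by
  unfold PySem.List.pyGet?
  rw [pvIdx_slot s.length upper x hlen hx1 hx2]

theorem pvSetD_slot (s : List Int) (upper x v : Int) (hlen : (s.length : Int) = upper)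
    (hx1 : -upper ≤ x) (hx2 : x < upper) :
    PySem.List.pySetD s x v = PySem.List.pySetD s (pvSlot upper x) v := by
  unfold PySem.List.pySetD PySem.List.pySet?
  rw [pvIdx_slot s.length upper x hlen hx1 hx2]

theorem pvBuild_slot (upper : Int) :
    ∀ (l cs : List Int), (cs.length : Int) = upper → (∀ x ∈ l, -upper ≤ x ∧ x < upper) →
    pvBuildCounts l cs = pvBuildCounts (l.map (pvSlot upper)) cs := by
  intro l
  induction l with
  | nil => intro cs _ _; rfl
  | cons h t ih =>
    intro cs hlen hmem
    obtain ⟨hh1, hh2⟩ := hmem h List.mem_cons_self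
    show pvBuildCounts (h :: t) cs = pvBuildCounts (pvSlot upper h :: t.map (pvSlot upper)) cs
    unfold pvBuildCounts
    rw [pvGet_slot cs upper h hlen hh1 hh2]
    cases hget : PySem.List.pyGet? cs (pvSlot upper h) with
    | none => rfl
    | some c =>
      show pvBuildCounts t (PySem.List.pySetD cs h (c + 1))
        = pvBuildCounts (t.map (pvSlot upper)) (PySem.List.pySetD cs (pvSlot upper h) (c + 1))
      rw [pvSetD_slot cs upper h (c + 1) hlen hh1 hh2]
      have hlen' : ((PySem.List.pySetD cs (pvSlot upper h) (c + 1)).length : Int) = upper := by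
        rw [PySem.List.pySetD_of_nonneg cs _ (pvSlot_range upper h hh1 hh2).1]
        simp [hlen]
      exact ih _ hlen' (fun x hx => hmem x (List.mem_cons_of_mem _ hx))

theorem pvLoopA_slot_none (rank upper : Int) :
    ∀ (l s out out' : List Int), (s.length : Int) = upper → out.length = out'.length →
    (∀ x ∈ l, -upper ≤ x ∧ x < upper) →
    (pvLoopA rank l s out = none ↔ pvLoopA rank (l.map (pvSlot upper)) s out' = none) := by
  intro l
  induction l with
  | nil => intro s out out' _ _ _; exact Iff.rfl
  | cons h t ih =>
    intro s out out' hlen holen hmem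
    obtain ⟨hh1, hh2⟩ := hmem h List.mem_cons_self
    show pvLoopA rank (h :: t) s out = none ↔
      pvLoopA rank (pvSlot upper h :: t.map (pvSlot upper)) s out' = none
    unfold pvLoopA
    rw [pvGet_slot s upper h hlen hh1 hh2]
    cases hget : PySem.List.pyGet? s (pvSlot upper h) with
    | none => exact Iff.rfl
    | some sx =>
      show (if sx - 1 = rank then some h
          else match PySem.List.pySet? out (sx - 1) h with
            | none => none
            | some output' => pvLoopA rank t (PySem.List.pySetD s h (sx - 1)) output') = none ↔
        (if sx - 1 = rank then some (pvSlot upper h)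
          else match PySem.List.pySet? out' (sx - 1) (pvSlot upper h) with
            | none => none
            | some output' =>
              pvLoopA rank (t.map (pvSlot upper)) (PySem.List.pySetD s (pvSlot upper h) (sx - 1)) output') = none
      by_cases htrig : sx - 1 = rank
      · simp [htrig]
      · rw [if_neg htrig, if_neg htrig]
        unfold PySem.List.pySet?
        rw [← holen]
        cases hidx : PySem.List.pyIdx? out.length (sx - 1) with
        | none => exact Iff.rfl
        | some k =>
          simp only [Option.map_some]
          rw [pvSetD_slot s upper h (sx - 1) hlen hh1 hh2]
          apply ih
          · rw [PySem.List.pySetD_of_nonneg s _ (pvSlot_range upper h hh1 hh2).1]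
            simp [hlen]
          · simp [holen]
          · exact fun x hx => hmem x (List.mem_cons_of_mem _ hx)

-- ===== VERDICT (by name: the statement is the Claim_ definition above) =====
theorem median_counting_spec : Claim_equal_median_counting := by
  intro arr rank upper _ hpre
  obtain ⟨hpre1, hpre2⟩ := hpre
  unfold Spec_median_counting
  have hcdict : ∀ v : Int,
      (arr.foldl (fun d x => d.insert x (d.getD x 0 + 1)) PySem.Dict.empty).getD v 0
        = (arr.count v : Int) := by
    intro v
    rw [PySem.Dict.getD_foldl_insert_add_one, PySem.Dict.getD_empty]
    ring
  by_cases harr : arr = []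
  · subst harr
    simp [median_counting, pvBuildCounts, pvLoopA, median_counting_alt]
  · obtain ⟨x0, hx0⟩ := List.exists_mem_of_ne_nil arr harr
    have hup : 1 ≤ upper := by have := hpre1 x0 hx0; omega
    have hlen0 : ((((PySem.List.pyRange 0 upper 1).map (fun _ => (0 : Int))).length : Nat) : Int) = upper := by
      simp [PySem.List.length_pyRange_one]
      omega
    have holen : ((arr.map (fun _ => (0 : Int))).length : Int) = (arr.length : Int) := by simp
    by_cases hrk : 0 ≤ rank ∧ rank < (arr.length : Int)
    · -- in-range rank: Pre_ guarantees all values nonnegative; direct equivalence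
      have hpos : ∀ x ∈ arr, 0 ≤ x ∧ x < upper :=
        fun x hx => ⟨hpre2 hrk.1 hrk.2 x hx, (hpre1 x hx).2⟩
      obtain ⟨cs, hbuild, hcslen, hcsget⟩ := pvBuildCounts_spec arr
        ((PySem.List.pyRange 0 upper 1).map (fun _ => (0 : Int)))
        (by intro x hx; have := hpos x hx; omega)
      have hcs0 : ∀ j : Int, 0 ≤ j → j < upper →
          PySem.List.pyGetD cs j 0 = (arr.count j : Int) := by
        intro j hj0 hj1
        rw [hcsget j hj0 (by omega)]
        rw [PySem.List.pyGetD_map_pyRange_of_nonneg (fun _ => (0 : Int)) upper j 0 hj0 hj1]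
        ring
      obtain ⟨hslen, hsget⟩ := pvSumsFold_spec cs upper 0 0
        ((PySem.List.pyRange 0 upper 1).map (fun _ => (0 : Int))) le_rfl hlen0
      set S := ((PySem.List.pyRange 0 upper 1).foldl
        (fun (p : Int × List Int) i =>
          let tot := p.1 + PySem.List.pyGetD cs i 0
          (tot, PySem.List.pySetD p.2 i tot))
        ((0 : Int), (PySem.List.pyRange 0 upper 1).map (fun _ => (0 : Int)))).2 with hSdef
      have hSlen : ((S.length : Nat) : Int) = upper := by rw [hslen]; exact hlen0
      have hs : ∀ j : Int, 0 ≤ j → j < upper → PySem.List.pyGetD S j 0 = pvPS arr j := by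
        intro j hj0 hj1
        rw [hsget j hj0 hj1, if_neg (by omega), zero_add]
        unfold pvPS
        congr 1
        apply List.map_congr_left
        intro i hi
        have hi' := PySem.List.mem_pyRange_one.1 hi
        exact hcs0 i hi'.1 (by omega)
      have htot : pvPS arr (upper - 1) = (arr.length : Int) := pvPS_total arr upper hpos
      have hinv : pvInv (arr.length : Int) arr S := by
        refine ⟨?_, ?_, ?_⟩
        · intro x hx
          have := hpos x hx
          omega
        · intro x hx
          obtain ⟨hx0', hx1'⟩ := hpos x hx
          rw [hs x hx0' hx1']
          have h1 := pvPS_succ arr x hx0'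
          have h2 := pvPS_nonneg arr (x - 1)
          have h3 := pvPS_mono arr x (upper - 1) (by omega)
          omega
        · intro x hx y hy hxy
          obtain ⟨hx0', hx1'⟩ := hpos x hx
          obtain ⟨hy0', hy1'⟩ := hpos y hy
          rw [hs x hx0' hx1', hs y hy0' hy1']
          rcases lt_or_gt_of_ne hxy with hlt | hgt
          · left
            have := pvPS_mono arr x (y - 1) (by omega)
            have := pvPS_succ arr y hy0'
            omega
          · right
            have := pvPS_mono arr y (x - 1) (by omega)
            have := pvPS_succ arr x hx0'
            omega
      have hA : median_counting arr rank upper = pvLoopA rank arr S (arr.map (fun _ => (0 : Int))) := by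
        show (match pvBuildCounts arr ((PySem.List.pyRange 0 upper 1).map (fun _ => (0 : Int))) with
          | none => none
          | some counts =>
            pvLoopA rank arr (((PySem.List.pyRange 0 upper 1).foldl
              (fun (p : Int × List Int) i =>
                let tot := p.1 + PySem.List.pyGetD counts i 0
                (tot, PySem.List.pySetD p.2 i tot))
              ((0 : Int), (PySem.List.pyRange 0 upper 1).map (fun _ => (0 : Int)))).2)
              (arr.map (fun _ => (0 : Int)))) = pvLoopA rank arr S (arr.map (fun _ => (0 : Int)))
        rw [hbuild]
      obtain ⟨v, hv1, hv2, hv3, hv4, hv5⟩ := pvScanB_exists arr rank upper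
        (arr.foldl (fun d x => d.insert x (d.getD x 0 + 1)) PySem.Dict.empty) hcdict
        0 le_rfl (by omega)
        (by rw [pvPS_neg arr (0 - 1) (by omega)]; omega)
        (by omega)
      have hB : median_counting_alt arr rank upper = some v := by
        unfold median_counting_alt
        rw [if_pos hrk]
        have h0 : pvPS arr (0 - 1) = 0 := pvPS_neg arr (0 - 1) (by omega)
        rw [h0] at hv5
        exact hv5
      rw [hA, hB]
      have hvmem : v ∈ arr := by
        have h1 := pvPS_succ arr v (by omega)
        have : 0 < arr.count v := by omega
        exact List.count_pos_iff.1 this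
      apply pvLoopA_some rank arr S (arr.map (fun _ => (0 : Int)))
        (by rw [holen]; exact hinv) v hvmem
      · rw [hs v (by omega) hv2]
        have := pvPS_succ arr v (by omega)
        omega
      · rw [hs v (by omega) hv2]
        exact hv4
    · -- rank out of [0, len): both return None; negative values act through their wrapped slot
      have hB : median_counting_alt arr rank upper = none := by
        unfold median_counting_alt
        rw [if_neg hrk]
      rw [hB]
      -- work with the slot-mapped array, whose values are all in [0, upper)
      set arr' := arr.map (pvSlot upper) with harr'
      have hpos : ∀ y ∈ arr', 0 ≤ y ∧ y < upper := by
        intro y hy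
        obtain ⟨x, hx, rfl⟩ := List.mem_map.1 hy
        exact pvSlot_range upper x (hpre1 x hx).1 (hpre1 x hx).2
      have hlen' : (arr'.length : Int) = (arr.length : Int) := by simp [harr']
      obtain ⟨cs, hbuild, hcslen, hcsget⟩ := pvBuildCounts_spec arr'
        ((PySem.List.pyRange 0 upper 1).map (fun _ => (0 : Int)))
        (by intro x hx; have := hpos x hx; omega)
      have hcs0 : ∀ j : Int, 0 ≤ j → j < upper →
          PySem.List.pyGetD cs j 0 = (arr'.count j : Int) := by
        intro j hj0 hj1
        rw [hcsget j hj0 (by omega)]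
        rw [PySem.List.pyGetD_map_pyRange_of_nonneg (fun _ => (0 : Int)) upper j 0 hj0 hj1]
        ring
      obtain ⟨hslen, hsget⟩ := pvSumsFold_spec cs upper 0 0
        ((PySem.List.pyRange 0 upper 1).map (fun _ => (0 : Int))) le_rfl hlen0
      set S := ((PySem.List.pyRange 0 upper 1).foldl
        (fun (p : Int × List Int) i =>
          let tot := p.1 + PySem.List.pyGetD cs i 0
          (tot, PySem.List.pySetD p.2 i tot))
        ((0 : Int), (PySem.List.pyRange 0 upper 1).map (fun _ => (0 : Int)))).2 with hSdef
      have hSlen : ((S.length : Nat) : Int) = upper := by rw [hslen]; exact hlen0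
      have hs : ∀ j : Int, 0 ≤ j → j < upper → PySem.List.pyGetD S j 0 = pvPS arr' j := by
        intro j hj0 hj1
        rw [hsget j hj0 hj1, if_neg (by omega), zero_add]
        unfold pvPS
        congr 1
        apply List.map_congr_left
        intro i hi
        have hi' := PySem.List.mem_pyRange_one.1 hi
        exact hcs0 i hi'.1 (by omega)
      have htot : pvPS arr' (upper - 1) = (arr.length : Int) := by
        rw [pvPS_total arr' upper hpos, hlen']
      have hinv : pvInv (arr.length : Int) arr' S := by
        refine ⟨?_, ?_, ?_⟩
        · intro x hx
          have := hpos x hx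
          omega
        · intro x hx
          obtain ⟨hx0', hx1'⟩ := hpos x hx
          rw [hs x hx0' hx1']
          have h1 := pvPS_succ arr' x hx0'
          have h2 := pvPS_nonneg arr' (x - 1)
          have h3 := pvPS_mono arr' x (upper - 1) (by omega)
          omega
        · intro x hx y hy hxy
          obtain ⟨hx0', hx1'⟩ := hpos x hx
          obtain ⟨hy0', hy1'⟩ := hpos y hy
          rw [hs x hx0' hx1', hs y hy0' hy1']
          rcases lt_or_gt_of_ne hxy with hlt | hgt
          · left
            have := pvPS_mono arr' x (y - 1) (by omega)
            have := pvPS_succ arr' y hy0'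
            omega
          · right
            have := pvPS_mono arr' y (x - 1) (by omega)
            have := pvPS_succ arr' x hx0'
            omega
      have hA : median_counting arr rank upper = pvLoopA rank arr S (arr.map (fun _ => (0 : Int))) := by
        show (match pvBuildCounts arr ((PySem.List.pyRange 0 upper 1).map (fun _ => (0 : Int))) with
          | none => none
          | some counts =>
            pvLoopA rank arr (((PySem.List.pyRange 0 upper 1).foldl
              (fun (p : Int × List Int) i =>
                let tot := p.1 + PySem.List.pyGetD counts i 0
                (tot, PySem.List.pySetD p.2 i tot))
              ((0 : Int), (PySem.List.pyRange 0 upper 1).map (fun _ => (0 : Int)))).2)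
              (arr.map (fun _ => (0 : Int)))) = pvLoopA rank arr S (arr.map (fun _ => (0 : Int)))
        rw [pvBuild_slot upper arr _ hlen0 hpre1, ← harr', hbuild]
      rw [hA]
      rw [pvLoopA_slot_none rank upper arr S (arr.map (fun _ => (0 : Int)))
        (arr.map (fun _ => (0 : Int))) hSlen rfl hpre1, ← harr']
      apply pvLoopA_none rank arr' S (arr.map (fun _ => (0 : Int)))
        (by rw [holen]; exact hinv)
      intro x hx
      obtain ⟨hx0', hx1'⟩ := hpos x hx
      rw [hs x hx0' hx1']
      have h1 := pvPS_succ arr' x hx0'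
      have h2 := pvPS_nonneg arr' (x - 1)
      have h3 := pvPS_mono arr' x (upper - 1) (by omega)
      omega
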